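-- pv_equiv track=rewrite | github.com/thoughtworks/epirust | orchestrator/config/generate.py | generate_travel_matrix
-- ===== SOURCE A (Python) =====
-- def generate_travel_matrix(region_count, count):
--     rows, cols = (region_count, region_count)
--     arr = [[int(count) for i in range(cols)] for j in range(rows)]
--     for (i,row) in enumerate(arr):
--         for (j,value) in enumerate(row):
--             if i == j:
--                 arr[i][j] = 0
--     return arr
-- ===== SOURCE B (Python) =====
-- def generate_travel_matrix(region_count, count):
--     n = region_count
--     c = int(count)
--     flat = ([0] + [c] * n) * n
--     return [flat[k * n : k * n + n] for k in range(n)]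
-- ===== Notes on version B (the rewrite author's own statement) =====
-- stated objective: alternative
-- what changed: B builds one flat list ([0] + [c]*n) * n, whose period-(n+1) zero pattern against row length n puts the zeros exactly on the diagonal, and slices out the n rows; A builds the full constant matrix cell by cell and then mutates the diagonal in a second enumerate-and-rescan pass.
import Mathlib
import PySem

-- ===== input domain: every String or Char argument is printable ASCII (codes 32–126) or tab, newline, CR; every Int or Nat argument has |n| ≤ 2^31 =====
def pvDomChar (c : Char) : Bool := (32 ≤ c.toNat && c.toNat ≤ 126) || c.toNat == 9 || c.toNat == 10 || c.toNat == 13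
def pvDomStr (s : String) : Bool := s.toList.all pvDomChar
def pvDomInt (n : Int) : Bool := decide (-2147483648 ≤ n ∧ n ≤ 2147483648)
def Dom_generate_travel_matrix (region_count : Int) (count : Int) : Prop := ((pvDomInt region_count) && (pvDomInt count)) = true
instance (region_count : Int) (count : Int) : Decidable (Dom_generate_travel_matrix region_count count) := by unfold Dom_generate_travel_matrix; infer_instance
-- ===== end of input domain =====

-- B replaces A's build-then-rescan with a flat-list construction: the pattern
-- [0] + [c]*n repeated n times places the zero diagonal by arithmetic stride
-- (period n+1 vs row length n), and rows are cut out by slicing (objective: alternative).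


-- ===== PORT A =====
-- literal port: build the full matrix, then enumerate rows/cells and zero the diagonal.
-- 'arr[i][j] = 0' is ported as List.set at i.toNat / j.toNat: enumerate indices are ≥ 0, so this is exact.
def generate_travel_matrix (region_count : Int) (count : Int) : List (List Int) :=
  let arr := (PySem.List.pyRange 0 region_count 1).map
      (fun _j => (PySem.List.pyRange 0 region_count 1).map (fun _i => count))
  (PySem.List.enumerate arr 0).foldl (fun a p =>
    (PySem.List.enumerate p.2 0).foldl (fun a' q =>
      if p.1 == q.1 then a'.set p.1.toNat ((PySem.List.pyGetD a' p.1 []).set q.1.toNat 0)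
      else a') a) arr

-- ===== PORT B =====
-- flat = ([0] + [c]*n) * n ; row k = flat[k*n : k*n+n]
def generate_travel_matrix_alt (region_count : Int) (count : Int) : List (List Int) :=
  let n := region_count
  let c := count
  let flat := PySem.List.pyRepeat ((0 : Int) :: PySem.List.pyRepeat [c] n) n
  (PySem.List.pyRange 0 n 1).map
    (fun k => PySem.List.slice flat (some (k * n)) (some (k * n + n)))

-- ===== PRECONDITION & SPEC =====
def Spec_generate_travel_matrix (region_count : Int) (count : Int) (out : List (List Int)) : Prop := out = generate_travel_matrix_alt region_count count
instance (region_count : Int) (count : Int) (out : List (List Int)) : Decidable (Spec_generate_travel_matrix region_count count out) := by unfold Spec_generate_travel_matrix; infer_instance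

-- ===== CLAIM (what is proved, stated in full; the proofs are below) =====
def Claim_equal_generate_travel_matrix : Prop := ∀ (region_count : Int) (count : Int), Dom_generate_travel_matrix region_count count → Spec_generate_travel_matrix region_count count (generate_travel_matrix region_count count)

-- ===== LEMMAS AND PROOFS =====

-- the canonical matrix both programs compute
def pvM (n : Nat) (c : Int) : List (List Int) :=
  (List.range n).map (fun i => (List.range n).map (fun j : Nat => if i = j then 0 else c))

-- fold where the body fires nowhere on the list
lemma pv_foldl_none {α : Type} (g : α → α) (i : Nat) (l : List Nat) (hc : l.count i = 0)
    (a : α) : l.foldl (fun a j => if i = j then g a else a) a = a := by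
  induction l generalizing a with
  | nil => rfl
  | cons h t ih =>
    simp only [List.count_cons, beq_iff_eq] at hc
    by_cases hh : i = h
    · exfalso; subst hh; simp at hc
    · simp only [List.foldl_cons, if_neg hh]
      exact ih (by omega) a

-- fold where the body fires exactly once on the list
lemma pv_foldl_single {α : Type} (g : α → α) (i : Nat) (l : List Nat) (hc : l.count i = 1)
    (a : α) : l.foldl (fun a j => if i = j then g a else a) a = g a := by
  induction l generalizing a with
  | nil => simp at hc
  | cons h t ih =>
    simp only [List.count_cons, beq_iff_eq] at hc
    by_cases hh : i = h
    · subst hh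
      simp only [List.foldl_cons]
      simp only [if_true]
      apply pv_foldl_none
      simp at hc
      omega
    · simp only [List.foldl_cons, if_neg hh]
      have hne : ¬ (h = i) := fun e => hh e.symm
      simp only [if_neg hne, Nat.add_zero] at hc
      exact ih hc a

-- zeroing position i of a constant row gives row i of pvM
lemma pv_row_set (n i : Nat) (c : Int) (_hi : i < n) :
    (List.replicate n c).set i 0
      = (List.range n).map (fun j : Nat => if i = j then 0 else c) := by
  apply List.ext_getElem
  · simp
  · intro k h1 h2
    simp only [List.getElem_set, List.getElem_replicate, List.getElem_map, List.getElem_range]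

-- A's outer loop over the first m rows, characterised
lemma pv_outer (n : Nat) (c : Int) (m : Nat) (hm : m ≤ n) :
    (List.range m).foldl
        (fun a k => a.set k ((a.getD k []).set k 0))
        (List.replicate n (List.replicate n c))
      = (List.range n).map (fun i =>
          if i < m then (List.range n).map (fun j : Nat => if i = j then 0 else c)
          else List.replicate n c) := by
  induction m with
  | zero =>
    apply List.ext_getElem <;> simp
  | succ m ih =>
    rw [List.range_succ, List.foldl_append, ih (by omega)]
    simp only [List.foldl_cons, List.foldl_nil]
    have hmn : m < n := by omega
    have hget : ((List.range n).map (fun i =>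
        if i < m then (List.range n).map (fun j : Nat => if i = j then 0 else c)
        else List.replicate n c)).getD m [] = List.replicate n c := by
      rw [List.getD_eq_getElem _ _ (by simpa using hmn)]
      simp
    rw [hget, pv_row_set n m c hmn]
    apply List.ext_getElem
    · simp
    · intro k h1 h2
      simp only [List.getElem_set] at *
      by_cases hk : m = k
      · subst hk; simp
      · simp only [if_neg hk, List.getElem_map, List.getElem_range]
        have hiff : (k < m + 1) ↔ (k < m) := by omega
        simp only [hiff]

-- A computes pvM
theorem pv_A_eq (region_count count : Int) :
    generate_travel_matrix region_count count = pvM (region_count.toNat) count := by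
  unfold generate_travel_matrix pvM
  dsimp only
  set n : Nat := region_count.toNat with hn
  have hpr : PySem.List.pyRange 0 region_count 1
      = (List.range n).map (fun k : Nat => (k : Int)) := by
    rw [PySem.List.pyRange_one]
    simp [hn]
  rw [hpr]
  have harr : ((List.range n).map (fun k : Nat => (k : Int))).map
      (fun _j => ((List.range n).map (fun k : Nat => (k : Int))).map (fun _i => count))
      = List.replicate n (List.replicate n count) := by
    apply List.ext_getElem
    · simp
    · intro k h1 h2
      simp [Function.comp_def, List.map_const']
  rw [harr]
  have henum : PySem.List.enumerate (List.replicate n (List.replicate n count)) 0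
      = (List.range n).map (fun k : Nat => ((k : Int), List.replicate n count)) := by
    apply List.ext_getElem
    · simp [PySem.List.length_enumerate]
    · intro k h1 h2
      simp only [PySem.List.length_enumerate, List.length_replicate] at h1
      rw [PySem.List.getElem_enumerate]
      simp
  rw [henum, List.foldl_map]
  have hinner : ∀ (k : Nat) (a : List (List Int)), k < n →
      (PySem.List.enumerate (List.replicate n count) 0).foldl
        (fun a' q =>
          if ((k : Nat) : Int) == q.1 then
            a'.set ((k : Nat) : Int).toNat
              ((PySem.List.pyGetD a' ((k : Nat) : Int) []).set q.1.toNat 0)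
          else a') a
      = a.set k ((a.getD k []).set k 0) := by
    intro k a hk
    have he : PySem.List.enumerate (List.replicate n count) 0
        = (List.range n).map (fun j : Nat => ((j : Int), count)) := by
      apply List.ext_getElem
      · simp [PySem.List.length_enumerate]
      · intro j h1 h2
        simp only [PySem.List.length_enumerate, List.length_replicate] at h1
        rw [PySem.List.getElem_enumerate]
        simp
    rw [he, List.foldl_map]
    have hcongr : ∀ (a' : List (List Int)) (j : Nat),
        (if ((k : Int) == (j : Int)) then
            a'.set ((k : Int)).toNat ((PySem.List.pyGetD a' (k : Int) []).set ((j : Int)).toNat 0)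
          else a')
        = (if k = j then a'.set k ((a'.getD k []).set k 0) else a') := by
      intro a' j
      by_cases hkj : k = j
      · subst hkj
        simp [PySem.List.pyGetD_natCast]
      · have : ¬ ((k : Int) == (j : Int)) = true := by
          simp only [beq_iff_eq, Int.natCast_inj]; exact hkj
        simp [hkj, this]
    refine (PySem.List.foldl_congr_mem _ _
        (fun a' (j : Nat) => if k = j then a'.set k ((a'.getD k []).set k 0) else a') _ ?_).trans ?_
    · intro acc x _
      exact hcongr acc x
    · exact pv_foldl_single _ k _
        (List.count_eq_one_of_mem (List.nodup_range) (List.mem_range.mpr hk)) a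
  have hfold : (List.range n).foldl
      (fun a (k : Nat) =>
        (PySem.List.enumerate (List.replicate n count) 0).foldl
          (fun a' q =>
            if ((k : Int) == q.1) then
              a'.set ((k : Int)).toNat ((PySem.List.pyGetD a' (k : Int) []).set q.1.toNat 0)
            else a') a)
      (List.replicate n (List.replicate n count))
      = (List.range n).foldl (fun a k => a.set k ((a.getD k []).set k 0))
          (List.replicate n (List.replicate n count)) := by
    apply PySem.List.foldl_congr_mem
    intro acc x hx
    exact hinner x acc (by simpa using hx)
  rw [hfold, pv_outer n count n le_rfl]
  apply List.ext_getElem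
  · simp
  · intro k h1 h2
    simp only [List.length_map, List.length_range] at h1
    simp [h1]

-- element q*L + r of the flattened k-fold repetition of a block b of length L
lemma pv_getElem_flat {α : Type} (b : List α) (k q r m : Nat) (hq : q < k) (hr : r < b.length)
    (hm : m = q * b.length + r)
    (h : m < ((List.replicate k b).flatten).length) :
    ((List.replicate k b).flatten)[m] = b[r] := by
  subst hm
  induction q generalizing k with
  | zero =>
    obtain ⟨k', rfl⟩ : ∃ k', k = k' + 1 := ⟨k - 1, by omega⟩
    simp only [List.replicate_succ, List.flatten_cons]
    rw [List.getElem_append_left (by simpa using hr)]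
    simp
  | succ q ih =>
    obtain ⟨k', rfl⟩ : ∃ k', k = k' + 1 := ⟨k - 1, by omega⟩
    simp only [List.replicate_succ, List.flatten_cons]
    have hidx : (q + 1) * b.length + r - b.length = q * b.length + r := by
      rw [Nat.succ_mul]; omega
    rw [List.getElem_append_right (by rw [Nat.succ_mul]; omega)]
    have hlt : q * b.length + r < ((List.replicate k' b).flatten).length := by
      simp only [List.length_flatten, List.map_replicate, List.sum_replicate,
        smul_eq_mul, Nat.succ_mul] at h ⊢
      omega
    have := ih k' (by omega) hlt
    simp only [hidx]
    exact this

-- one row of B's flat list: drop i*n, take n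
lemma pv_row_flat (n i : Nat) (c : Int) (hi : i < n) :
    ((((List.replicate n ((0 : Int) :: List.replicate n c)).flatten).drop (i * n)).take n)
      = (List.range n).map (fun j : Nat => if i = j then 0 else c) := by
  have hlen : ((List.replicate n ((0 : Int) :: List.replicate n c)).flatten).length
      = n * (n + 1) := by
    simp [List.length_flatten, List.map_replicate, List.sum_replicate]
  apply List.ext_getElem
  · simp only [List.length_take, List.length_drop, hlen, List.length_map, List.length_range]
    have : i * n + n ≤ n * (n + 1) := by nlinarith
    omega
  · intro j h1 h2
    simp only [List.length_take, List.length_drop, hlen] at h1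
    simp only [List.length_map, List.length_range] at h2
    rw [List.getElem_take, List.getElem_drop]
    simp only [List.getElem_map, List.getElem_range]
    have hb : ((0 : Int) :: List.replicate n c).length = n + 1 := by simp
    by_cases hij : i ≤ j
    · have hidx : i * n + j = i * ((0 : Int) :: List.replicate n c).length + (j - i) := by
        rw [hb, Nat.mul_add, Nat.mul_one]; omega
      rw [pv_getElem_flat _ n i (j - i) _ hi (by rw [hb]; omega) hidx]
      by_cases he : i = j
      · subst he; simp
      · have hji : 0 < j - i := by omega
        obtain ⟨m, hm⟩ : ∃ m, j - i = m + 1 := ⟨j - i - 1, by omega⟩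
        rw [if_neg he]
        simp only [hm, List.getElem_cons_succ, List.getElem_replicate]
    · have hji : j < i := by omega
      obtain ⟨i', rfl⟩ : ∃ i', i = i' + 1 := ⟨i - 1, by omega⟩
      have hidx : (i' + 1) * n + j
          = i' * ((0 : Int) :: List.replicate n c).length + (n + 1 + j - (i' + 1)) := by
        rw [hb, Nat.succ_mul, Nat.mul_add, Nat.mul_one]; omega
      rw [pv_getElem_flat _ n i' (n + 1 + j - (i' + 1)) _ (by omega) (by rw [hb]; omega) hidx]
      obtain ⟨m, hm⟩ : ∃ m, n + 1 + j - (i' + 1) = m + 1 := ⟨n + j - (i' + 1), by omega⟩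
      rw [if_neg (by omega)]
      simp only [hm, List.getElem_cons_succ, List.getElem_replicate]

-- B computes pvM
theorem pv_B_eq (region_count count : Int) :
    generate_travel_matrix_alt region_count count = pvM (region_count.toNat) count := by
  unfold generate_travel_matrix_alt pvM
  dsimp only
  set n : Nat := region_count.toNat with hn
  have hpr : PySem.List.pyRange 0 region_count 1
      = (List.range n).map (fun k : Nat => (k : Int)) := by
    rw [PySem.List.pyRange_one]
    simp [hn]
  rw [hpr, List.map_map]
  rcases Nat.eq_zero_or_pos n with h0 | hpos
  · simp [h0]
  · have hreg : region_count = (n : Int) := by omega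
    have hrep : PySem.List.pyRepeat ([count] : List Int) region_count = List.replicate n count := by
      rw [PySem.List.pyRepeat_singleton, hreg]; rw [Int.toNat_natCast]
    apply List.ext_getElem
    · simp
    · intro i h1 h2
      simp only [List.length_map, List.length_range] at h1
      simp only [List.getElem_map, List.getElem_range, Function.comp_apply]
      rw [hrep]
      have hslice : PySem.List.slice
          (PySem.List.pyRepeat ((0 : Int) :: List.replicate n count) region_count)
          (some ((i : Int) * region_count)) (some ((i : Int) * region_count + region_count))
          = (List.range n).map (fun j : Nat => if i = j then 0 else count) := by
        have hrep2 : PySem.List.pyRepeat ((0 : Int) :: List.replicate n count) region_count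
            = (List.replicate n ((0 : Int) :: List.replicate n count)).flatten := by
          show (List.replicate region_count.toNat _).flatten = _
          rw [← hn]
        rw [hrep2, hreg]
        rw [show ((i : Int) * (n : Int)) = ((i * n : Nat) : Int) by push_cast; ring]
        rw [show ((i * n : Nat) : Int) + (n : Int) = ((i * n : Nat) : Int) + ((n : Nat) : Int) by norm_num]
        rw [PySem.List.slice_natCast_add]
        exact pv_row_flat n i count h1
      exact hslice

-- ===== VERDICT (by name: the statement is the Claim_ definition above) =====
theorem generate_travel_matrix_spec : Claim_equal_generate_travel_matrix := by
  intro region_count count _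
  show _ = _
  rw [pv_A_eq, pv_B_eq]
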